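-- pv_equiv track=rewrite | github.com/SalvadorBertazzo/AdventOfCode2022-Python | Day-3/main.py | find_number
-- ===== SOURCE A (Python) =====
-- def find_number(repeated):
--     lower_values = {'a': 1, 'b': 2, 'c': 3, 'd': 4, 'e': 5, 'f': 6, 'g': 7, 'h': 8, 'i': 9, 'j': 10, 'k': 11, 'l': 12,
--                     'm': 13, 'n': 14, 'o': 15, 'p': 16, 'q': 17, 'r': 18, 's': 19, 't': 20, 'u': 21, 'v': 22, 'w': 23,
--                     'x': 24, 'y': 25, 'z': 26}
--     upper_values = {}
--     for k, v in lower_values.items():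
--         upper_values.update({k.upper(): v + 26})
--
--     if repeated.islower():
--         return lower_values.get(repeated)
--     else:
--         return upper_values.get(repeated)
-- ===== SOURCE B (Python) =====
-- def find_number(repeated):
--     if len(repeated) == 1 and 'a' <= repeated <= 'z':
--         return ord(repeated) - 96
--     if len(repeated) == 1 and 'A' <= repeated <= 'Z':
--         return ord(repeated) - 38
--     return None
-- ===== Notes on version B (the rewrite author's own statement) =====
-- stated objective: simpler
-- what changed: Replaced the two 26-entry lookup tables (and the loop that builds the uppercase one) with a single length-1 range check and direct ord() arithmetic.
import Mathlib
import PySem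

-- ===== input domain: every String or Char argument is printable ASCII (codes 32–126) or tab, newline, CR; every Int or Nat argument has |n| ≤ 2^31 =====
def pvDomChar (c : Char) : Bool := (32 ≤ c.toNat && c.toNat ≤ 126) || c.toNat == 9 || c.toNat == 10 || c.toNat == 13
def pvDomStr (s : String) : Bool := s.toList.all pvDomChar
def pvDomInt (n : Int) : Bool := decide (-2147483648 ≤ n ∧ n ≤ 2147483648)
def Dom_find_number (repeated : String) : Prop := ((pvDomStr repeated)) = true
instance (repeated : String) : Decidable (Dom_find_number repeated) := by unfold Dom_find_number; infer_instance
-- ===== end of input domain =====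

-- B replaces A's two lookup tables (and the table-building loop) by a length-1 check and ord() arithmetic; objective: simpler.

-- ===== PORT A =====
-- hand port of Python str.islower(): some cased character and no uppercase one;
-- exact on the ASCII domain, where the cased characters are exactly the letters
def pyStrIslower (cs : List Char) : Bool :=
  (cs.any PySem.Chars.islower) && !(cs.any PySem.Chars.isupper)

def pvLowerValues : PySem.Dict String Int := PySem.Dict.ofList
  [("a",1),("b",2),("c",3),("d",4),("e",5),("f",6),("g",7),("h",8),("i",9),("j",10),
   ("k",11),("l",12),("m",13),("n",14),("o",15),("p",16),("q",17),("r",18),("s",19),("t",20),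
   ("u",21),("v",22),("w",23),("x",24),("y",25),("z",26)]

-- the `for k, v in lower_values.items(): upper_values.update({k.upper(): v + 26})` loop
def pvUpperValues : PySem.Dict String Int :=
  pvLowerValues.items.foldl
    (fun d kv => d.update [(PySem.Str.upper kv.1, kv.2 + 26)]) PySem.Dict.empty

def find_number (repeated : String) : Option Int :=
  if pyStrIslower repeated.toList then
    pvLowerValues.get? repeated
  else
    pvUpperValues.get? repeated

-- ===== PORT B =====
-- Source B: single length-1 range checks ('a' <= repeated <= 'z' on a length-1 string
-- is the code-point comparison on its character) and ord arithmetic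
def find_number_alt (repeated : String) : Option Int :=
  match repeated.toList with
  | [c] =>
    if 'a' ≤ c ∧ c ≤ 'z' then some ((c.toNat : Int) - 96)
    else if 'A' ≤ c ∧ c ≤ 'Z' then some ((c.toNat : Int) - 38)
    else none
  | _ => none

-- ===== PRECONDITION & SPEC =====
def Spec_find_number (repeated : String) (out : Option Int) : Prop := out = find_number_alt repeated
instance (repeated : String) (out : Option Int) : Decidable (Spec_find_number repeated out) := by unfold Spec_find_number; infer_instance

-- ===== CLAIM (what is proved, stated in full; the proofs are below) =====
def Claim_equal_find_number : Prop := ∀ (repeated : String), Dom_find_number repeated → Spec_find_number repeated (find_number repeated)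

-- ===== LEMMAS AND PROOFS =====

-- every key of either table is a single-character string
lemma pv_keys_lower : ∀ k ∈ pvLowerValues.keys, k.toList.length = 1 := by decide
lemma pv_keys_upper : ∀ k ∈ pvUpperValues.keys, k.toList.length = 1 := by decide

lemma pv_get_none {d : PySem.Dict String Int}
    (hk : ∀ k ∈ d.keys, k.toList.length = 1)
    (s : String) (hs : s.toList.length ≠ 1) : d.get? s = none := by
  rw [PySem.Dict.get?_eq_none_iff_not_mem_keys]
  intro hmem
  exact hs (hk s hmem)

-- both ports agree on every singleton string over an ASCII character
set_option maxRecDepth 4096 in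
lemma pv_single_all : (((List.range 128).map Char.ofNat).all
    (fun c => find_number (String.singleton c) == find_number_alt (String.singleton c))) = true := by decide

lemma pv_single (c : Char) (h : c ∈ (List.range 128).map Char.ofNat) :
    find_number (String.singleton c) = find_number_alt (String.singleton c) := by
  have := List.all_eq_true.mp pv_single_all c h
  exact beq_iff_eq.mp (by simpa using this)

-- ===== VERDICT (by name: the statement is the Claim_ definition above) =====
theorem find_number_spec : Claim_equal_find_number := by
  intro s hdom
  unfold Spec_find_number
  cases h : s.toList with
  | nil =>
      have h1 : s.toList.length ≠ 1 := by rw [h]; simp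
      simp [find_number, find_number_alt, h, pyStrIslower,
        pv_get_none pv_keys_upper s h1]
  | cons c t =>
      cases t with
      | nil =>
          have hc : pvDomChar c = true := by
            have := hdom
            unfold Dom_find_number pvDomStr at this
            rw [h] at this; simpa using this
          have hlt : c.toNat < 128 := by
            unfold pvDomChar at hc
            simp only [Bool.or_eq_true, Bool.and_eq_true, decide_eq_true_eq,
              Nat.le_iff_lt_or_eq, beq_iff_eq] at hc
            omega
          have hmem : c ∈ (List.range 128).map Char.ofNat :=
            List.mem_map.mpr ⟨c.toNat, List.mem_range.mpr hlt, Char.ofNat_toNat c⟩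
          have hs : s = String.singleton c := by
            apply String.toList_inj.mp
            rw [h]; simp
          rw [hs]
          exact pv_single c hmem
      | cons x t2 =>
          have h1 : s.toList.length ≠ 1 := by rw [h]; simp
          simp only [find_number, find_number_alt, h,
            pv_get_none pv_keys_lower s h1, pv_get_none pv_keys_upper s h1]
          split <;> rfl
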